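-- pv_equiv track=rewrite | github.com/balajigood3/PROJECTS-ASSIGNMENTS | Week-18_ AI Agents/1.Converseable Agent/1.Two Agents-Code Executor/coding/permutations.py | count_unique_permutations
-- ===== SOURCE A (Python) =====
-- from math import factorial
--
-- def count_unique_permutations(word):
--   """Counts the number of unique permutations of a word.
--
--   Args:
--     word: The word to count the permutations of.
--
--   Returns:
--     The number of unique permutations of the word.
--   """
--
--   # Create a dictionary to store the count of each letter in the word.
--   letter_counts = {}
--   for letter in word:
--     if letter not in letter_counts:
--       letter_counts[letter] = 0
--     letter_counts[letter] += 1
--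
--   # Calculate the number of unique permutations of the word.
--   num_permutations = factorial(len(word))
--   for letter_count in letter_counts.values():
--     num_permutations //= factorial(letter_count)
--
--   return num_permutations
-- ===== SOURCE B (Python) =====
-- def count_unique_permutations(word):
--   """Counts the number of unique permutations of a word (incremental multinomial)."""
--   result = 1
--   length = 0
--   letter_counts = {}
--   for letter in word:
--     length += 1
--     letter_counts[letter] = letter_counts.get(letter, 0) + 1
--     result = result * length // letter_counts[letter]
--   return result
-- ===== Notes on version B (the rewrite author's own statement) =====
-- stated objective: alternative
-- what changed: Replaces factorial(len(word)) plus a final loop of factorial floor-divisions over the counts dict with a single pass maintaining an incremental multinomial recurrence (result = result * length // count_of_letter), so no factorials are ever computed; it trades the up-front factorial for one exact division per character.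
import Mathlib
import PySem

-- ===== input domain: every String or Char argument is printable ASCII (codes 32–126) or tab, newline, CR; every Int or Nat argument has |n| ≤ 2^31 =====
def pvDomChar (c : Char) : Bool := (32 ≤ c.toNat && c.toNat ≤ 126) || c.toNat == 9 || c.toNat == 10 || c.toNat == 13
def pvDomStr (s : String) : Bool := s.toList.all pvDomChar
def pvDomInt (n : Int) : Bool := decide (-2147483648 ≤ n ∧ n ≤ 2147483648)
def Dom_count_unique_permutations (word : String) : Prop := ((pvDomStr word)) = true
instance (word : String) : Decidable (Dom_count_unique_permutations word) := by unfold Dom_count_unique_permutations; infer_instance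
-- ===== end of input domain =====

-- B replaces factorial(len(word)) and the final factorial-division loop with a one-pass
-- incremental multinomial recurrence (result = result * length // count); objective: alternative algorithm.

-- ===== PORT A =====
-- math.factorial on the (nonnegative) length/counts is ported as Nat.factorial of the .toNat
def count_unique_permutations (word : String) : Int :=
  let letter_counts : PySem.Dict Char Int :=
    word.toList.foldl (fun d letter =>
      let d := if d.contains letter then d else d.insert letter 0
      d.insert letter (d.getD letter 0 + 1)) PySem.Dict.empty
  let num_permutations : Int := (Nat.factorial word.toList.length : Int)
  letter_counts.values.foldl
    (fun num letter_count => PySem.Int.floordiv num ((Nat.factorial letter_count.toNat : Nat) : Int))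
    num_permutations

-- ===== PORT B =====
def count_unique_permutations_alt (word : String) : Int :=
  (word.toList.foldl
    (fun (st : Int × Int × PySem.Dict Char Int) letter =>
      let length := st.2.1 + 1
      let counts := st.2.2.insert letter (st.2.2.getD letter 0 + 1)
      let result := PySem.Int.floordiv (st.1 * length) (counts.getD letter 0)
      (result, length, counts))
    (1, 0, PySem.Dict.empty)).1

-- ===== PRECONDITION & SPEC =====
def Spec_count_unique_permutations (word : String) (out : Int) : Prop := out = count_unique_permutations_alt word
instance (word : String) (out : Int) : Decidable (Spec_count_unique_permutations word out) := by unfold Spec_count_unique_permutations; infer_instance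

-- ===== CLAIM (what is proved, stated in full; the proofs are below) =====
def Claim_equal_count_unique_permutations : Prop := ∀ (word : String), Dom_count_unique_permutations word → Spec_count_unique_permutations word (count_unique_permutations word)

-- ===== LEMMAS AND PROOFS =====

-- product of factorials of the letter multiplicities
def Pfac (l : List Char) : Nat := ∏ a ∈ l.toFinset, Nat.factorial (l.count a)

theorem Pfac_pos (l : List Char) : 0 < Pfac l :=
  Finset.prod_pos (fun _ _ => Nat.factorial_pos _)

theorem Pfac_dvd (l : List Char) : Pfac l ∣ Nat.factorial l.length := by
  refine ⟨Nat.multinomial l.toFinset (fun a => l.count a), ?_⟩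
  have h := Nat.multinomial_spec l.toFinset (fun a => l.count a)
  rw [List.sum_toFinset_count_eq_length] at h
  exact h.symm

theorem Pfac_append (l : List Char) (c : Char) :
    Pfac (l ++ [c]) = Pfac l * (l.count c + 1) := by
  classical
  have hts : (l ++ [c]).toFinset = insert c l.toFinset := by
    ext a; simp
  have hcnt : ∀ a, (l ++ [c]).count a = l.count a + if a = c then 1 else 0 := by
    intro a
    rw [List.count_append]
    congr 1
    by_cases h : a = c
    · subst h; simp
    · rw [if_neg h, List.count_eq_zero]
      simp [h]
  have h1 : Pfac (l ++ [c])
      = Nat.factorial (l.count c + 1) * ∏ a ∈ l.toFinset.erase c, Nat.factorial (l.count a) := by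
    rw [Pfac, hts, ← Finset.mul_prod_erase _ _ (Finset.mem_insert_self c _),
        Finset.erase_insert_eq_erase, hcnt c, if_pos rfl]
    congr 1
    refine Finset.prod_congr rfl (fun a ha => ?_)
    rw [hcnt a, if_neg (Finset.ne_of_mem_erase ha), Nat.add_zero]
  have h2 : Pfac l
      = Nat.factorial (l.count c) * ∏ a ∈ l.toFinset.erase c, Nat.factorial (l.count a) := by
    by_cases h : c ∈ l.toFinset
    · rw [Pfac, ← Finset.mul_prod_erase _ _ h]
    · rw [Pfac, Finset.erase_eq_of_notMem h]
      have h0 : l.count c = 0 := by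
        rw [List.count_eq_zero]; simpa using h
      simp [h0]
  rw [h1, h2, Nat.factorial_succ]
  ring

-- A's dict-building step is extensionally the standard counter step
theorem A_step_eq :
    (fun (d : PySem.Dict Char Int) (letter : Char) =>
      let d := if d.contains letter then d else d.insert letter 0
      d.insert letter (d.getD letter 0 + 1))
    = fun (d : PySem.Dict Char Int) x => d.insert x (d.getD x 0 + 1) := by
  funext d x
  by_cases h : d.contains x = true
  · simp [h]
  · simp only [h, Bool.false_eq_true, if_false]
    rw [PySem.Dict.getD_insert_self, PySem.Dict.insert_insert_self,
        PySem.Dict.getD_of_not_contains _ _ (by simp [h])]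

-- exact sequential division by factorials
theorem foldl_div_exact (vs : List Nat) (m : Nat)
    (hd : (vs.map Nat.factorial).prod ∣ m) :
    vs.foldl (fun num v => num / Nat.factorial v) m = m / (vs.map Nat.factorial).prod := by
  induction vs generalizing m with
  | nil => simp
  | cons v t ih =>
    have hprod : (List.map Nat.factorial (v :: t)).prod
        = Nat.factorial v * (t.map Nat.factorial).prod := by simp
    obtain ⟨k, hk⟩ := hd
    have hmv : m / Nat.factorial v = (t.map Nat.factorial).prod * k := by
      rw [hk, hprod, mul_assoc, Nat.mul_div_cancel_left _ (Nat.factorial_pos v)]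
    have ht : (t.map Nat.factorial).prod ∣ m / Nat.factorial v := ⟨k, hmv⟩
    rw [List.foldl_cons, ih _ ht, Nat.div_div_eq_div_mul, hprod]

-- the Int fold of A over cast Nat counts is the cast of the Nat fold
theorem A_fold_cast (vs : List Nat) (m : Nat) :
    (vs.map Int.ofNat).foldl
        (fun num lc => PySem.Int.floordiv num ((Nat.factorial lc.toNat : Nat) : Int)) (m : Int)
      = ((vs.foldl (fun num v => num / Nat.factorial v) m : Nat) : Int) := by
  induction vs generalizing m with
  | nil => simp
  | cons v t ih =>
    simp only [List.map_cons, List.foldl_cons]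
    rw [show (Int.ofNat v).toNat = v from rfl,
        show (Nat.factorial v : Int) = ((Nat.factorial v : Nat) : Int) from rfl,
        PySem.Int.floordiv_natCast]
    exact ih (m / Nat.factorial v)

theorem values_counter (l : List Char) :
    (PySem.Dict.counter l).values = ((PySem.Set.ofList l).map l.count).map Int.ofNat := by
  simp [PySem.Dict.values, PySem.Dict.items_counter, List.map_map, Function.comp]

theorem prod_fac_counts (l : List Char) :
    (((PySem.Set.ofList l).map l.count).map Nat.factorial).prod = Pfac l := by
  have hnd : (PySem.Set.ofList l).Nodup := PySem.Set.nodup_ofList l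
  have hfin : (PySem.Set.ofList l).toFinset = l.toFinset := by
    ext a; simp [PySem.Set.mem_ofList]
  rw [List.map_map, Pfac, ← hfin, List.prod_toFinset _ hnd]
  rfl

theorem A_eq (word : String) :
    count_unique_permutations word
      = ((Nat.factorial word.toList.length / Pfac word.toList : Nat) : Int) := by
  unfold count_unique_permutations
  rw [A_step_eq, PySem.Dict.foldl_insert_getD_add_one_eq_counter]
  simp only []
  rw [values_counter,
      A_fold_cast, foldl_div_exact _ _ (by rw [prod_fac_counts]; exact Pfac_dvd word.toList),
      prod_fac_counts]

-- the counter step identity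
theorem counter_step (p : List Char) (c : Char) :
    (PySem.Dict.counter p).insert c ((PySem.Dict.counter p).getD c 0 + 1)
      = PySem.Dict.counter (p ++ [c]) := by
  rw [← PySem.Dict.foldl_insert_getD_add_one_eq_counter,
      ← PySem.Dict.foldl_insert_getD_add_one_eq_counter, List.foldl_append]
  simp

-- the one-step multinomial recurrence, exact in Nat division
theorem mult_step (p : List Char) (c : Char) :
    Nat.factorial p.length / Pfac p * (p.length + 1) / (p.count c + 1)
      = Nat.factorial (p ++ [c]).length / Pfac (p ++ [c]) := by
  obtain ⟨q, hq⟩ := Pfac_dvd p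
  have hqv : Nat.factorial p.length / Pfac p = q := by
    rw [hq, Nat.mul_div_cancel_left _ (Pfac_pos p)]
  have hlen : (p ++ [c]).length = p.length + 1 := by simp
  have hfac : Nat.factorial (p.length + 1) = Pfac p * (q * (p.length + 1)) := by
    rw [Nat.factorial_succ, hq]; ring
  rw [hqv, hlen, Pfac_append, ← Nat.div_div_eq_div_mul, hfac,
      Nat.mul_div_cancel_left _ (Pfac_pos p)]

theorem B_loop (rest p : List Char) :
    (rest.foldl
      (fun (st : Int × Int × PySem.Dict Char Int) letter =>
        let length := st.2.1 + 1
        let counts := st.2.2.insert letter (st.2.2.getD letter 0 + 1)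
        let result := PySem.Int.floordiv (st.1 * length) (counts.getD letter 0)
        (result, length, counts))
      (((Nat.factorial p.length / Pfac p : Nat) : Int), ((p.length : Nat) : Int),
        PySem.Dict.counter p)).1
    = ((Nat.factorial (p ++ rest).length / Pfac (p ++ rest) : Nat) : Int) := by
  induction rest generalizing p with
  | nil => simp
  | cons c rest ih =>
    rw [List.foldl_cons]
    have hcast : (((Nat.factorial p.length / Pfac p : Nat) : Int)) * (((p.length : Nat) : Int) + 1)
        = (((Nat.factorial p.length / Pfac p * (p.length + 1) : Nat) : Int)) := by push_cast; ring
    have hcc : ((PySem.Dict.counter p).getD c 0 + 1) = (((p.count c + 1 : Nat)) : Int) := by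
      rw [PySem.Dict.getD_counter]; push_cast; ring
    have hdict : (PySem.Dict.counter p).insert c (((p.count c + 1 : Nat)) : Int)
        = PySem.Dict.counter (p ++ [c]) := by
      rw [← hcc]; exact counter_step p c
    have hlen : ((p.length : Nat) : Int) + 1 = (((p ++ [c]).length : Nat) : Int) := by
      simp
    have hstate :
        (fun (st : Int × Int × PySem.Dict Char Int) letter =>
          let length := st.2.1 + 1
          let counts := st.2.2.insert letter (st.2.2.getD letter 0 + 1)
          let result := PySem.Int.floordiv (st.1 * length) (counts.getD letter 0)
          (result, length, counts))
          (((Nat.factorial p.length / Pfac p : Nat) : Int), ((p.length : Nat) : Int),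
            PySem.Dict.counter p) c
        = (((Nat.factorial (p ++ [c]).length / Pfac (p ++ [c]) : Nat) : Int),
            (((p ++ [c]).length : Nat) : Int), PySem.Dict.counter (p ++ [c])) := by
      simp only [PySem.Dict.getD_insert_self]
      rw [hcc, hcast, PySem.Int.floordiv_natCast, mult_step p c, hdict, hlen]
    refine Eq.trans (congrArg (fun s : Int × Int × PySem.Dict Char Int =>
      (List.foldl
        (fun (st : Int × Int × PySem.Dict Char Int) letter =>
          let length := st.2.1 + 1
          let counts := st.2.2.insert letter (st.2.2.getD letter 0 + 1)
          let result := PySem.Int.floordiv (st.1 * length) (counts.getD letter 0)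
          (result, length, counts)) s rest).1) hstate) ?_
    rw [List.append_cons p c rest]
    exact ih (p ++ [c])

-- ===== VERDICT (by name: the statement is the Claim_ definition above) =====
theorem count_unique_permutations_spec : Claim_equal_count_unique_permutations := by
  intro word _
  unfold Spec_count_unique_permutations
  have hB := B_loop word.toList []
  simp only [List.nil_append] at hB
  rw [A_eq]
  unfold count_unique_permutations_alt
  rw [← hB]
  norm_num [Pfac, PySem.Dict.counter]
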